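-- pv_equiv track=rewrite | github.com/rumhamryan/plex-o-tron | scripts/changelog_hooks.py | _find_first_entry
-- ===== SOURCE A (Python) =====
-- from typing import Sequence
--
-- def _find_first_entry(lines: Sequence[str]) -> tuple[int, int]:
--     """Return (start, end) indices for the first entry after the example block."""
--     after_example = False
--     start = None
--     for idx, line in enumerate(lines):
--         if not after_example:
--             if line.strip() == "---":
--                 after_example = True
--             continue
--         if line.startswith("Commit: "):
--             start = idx
--             break
--
--     if start is None:
--         raise ValueError("No changelog entries found after the example block.")
--
--     end = len(lines)
--     for idx in range(start + 1, len(lines)):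
--         if lines[idx].startswith("Commit: "):
--             end = idx
--             break
--     return start, end
-- ===== SOURCE B (Python) =====
-- from typing import Sequence
--
-- def _find_first_entry(lines: Sequence[str]) -> tuple[int, int]:
--     """Return (start, end) indices for the first entry after the example block."""
--     positions = []
--     seen = False
--     for idx, line in enumerate(lines):
--         if seen:
--             if line.startswith("Commit: "):
--                 positions.append(idx)
--         elif line.strip() == "---":
--             seen = True
--     if not positions:
--         raise ValueError("No changelog entries found after the example block.")
--     return positions[0], positions[1] if len(positions) > 1 else len(lines)
-- ===== Notes on version B (the rewrite author's own statement) =====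
-- stated objective: alternative
-- what changed: Replaces A's two separate searches (marker-then-first-Commit scan, then a second index loop for the next Commit) with a single pass that collects all post-marker Commit indices into a table and then reads positions[0] and positions[1] (or len(lines)) from it.
import Mathlib
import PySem

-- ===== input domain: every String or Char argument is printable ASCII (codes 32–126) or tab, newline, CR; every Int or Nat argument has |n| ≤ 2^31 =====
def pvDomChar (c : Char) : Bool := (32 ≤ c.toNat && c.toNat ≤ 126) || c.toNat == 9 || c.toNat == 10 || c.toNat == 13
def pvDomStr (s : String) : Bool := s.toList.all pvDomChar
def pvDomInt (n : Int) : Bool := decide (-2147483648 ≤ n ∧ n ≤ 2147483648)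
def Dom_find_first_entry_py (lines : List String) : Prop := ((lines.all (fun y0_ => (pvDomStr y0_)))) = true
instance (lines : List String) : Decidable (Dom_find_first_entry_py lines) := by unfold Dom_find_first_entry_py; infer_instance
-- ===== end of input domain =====

-- B is a single collect-all-positions pass instead of A's two separate searches (alternative decomposition, same cost).
-- A raises ValueError when no "Commit: " line follows the first "---" marker; B raises identically there, so Pre_ excludes those inputs.

-- ===== PORT A =====
-- first loop of A: enumerate(lines) — scan for the first "---" marker, then the first "Commit: " line after it
def pvFindStartA : List String → Nat → Bool → Option Nat
  | [], _, _ => none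
  | l :: ls, idx, after =>
    if after then
      if PySem.Str.startswith l "Commit: " then some idx
      else pvFindStartA ls (idx + 1) after
    else
      pvFindStartA ls (idx + 1) (if PySem.Str.strip l == "---" then true else after)

-- second loop of A: for idx in range(start+1, len(lines)) reading lines[idx] — i.e. a scan of the suffix
-- lines.drop (start+1) carrying the running index idx; dflt is the initial end = len(lines)
def pvFindEndA : List String → Nat → Nat → Nat
  | [], _, dflt => dflt
  | l :: ls, idx, dflt =>
    if PySem.Str.startswith l "Commit: " then idx else pvFindEndA ls (idx + 1) dflt

-- on inputs where the Python raises ValueError (no start found) the port returns (-1, -1); Pre_ excludes those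
def find_first_entry_py (lines : List String) : Int × Int :=
  match pvFindStartA lines 0 false with
  | none => (-1, -1)
  | some s => ((s : Int), (pvFindEndA (lines.drop (s + 1)) (s + 1) lines.length : Int))

-- ===== PORT B =====
-- B's single pass over enumerate(lines): collect the indices of every "Commit: " line after the first "---"
def pvCollectB : List String → Nat → Bool → List Nat
  | [], _, _ => []
  | l :: ls, idx, seen =>
    if seen then
      if PySem.Str.startswith l "Commit: " then idx :: pvCollectB ls (idx + 1) seen
      else pvCollectB ls (idx + 1) seen
    else
      pvCollectB ls (idx + 1) (if PySem.Str.strip l == "---" then true else seen)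

-- empty positions = Python B's ValueError; the port returns (-1, -1) there, outside Pre_
def find_first_entry_py_alt (lines : List String) : Int × Int :=
  match pvCollectB lines 0 false with
  | [] => (-1, -1)
  | [p] => ((p : Int), (lines.length : Int))
  | p :: q :: _ => ((p : Int), (q : Int))

-- ===== PRECONDITION & SPEC =====
-- Pre_ holds iff some "Commit: " line occurs strictly after some "---" marker line — exactly the inputs
-- on which the Python A (and B) return instead of raising ValueError.
def Pre_find_first_entry_py (lines : List String) : Prop :=
  ∃ i < lines.length, ∃ j < lines.length,
    i < j ∧ PySem.Str.strip lines[i]! = "---" ∧ PySem.Str.startswith lines[j]! "Commit: " = true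
instance (lines : List String) : Decidable (Pre_find_first_entry_py lines) := by
  unfold Pre_find_first_entry_py; infer_instance

def pvWitness_find_first_entry_py : List String := ["---", "Commit: abc"]

def Spec_find_first_entry_py (lines : List String) (out : Int × Int) : Prop := out = find_first_entry_py_alt lines
instance (lines : List String) (out : Int × Int) : Decidable (Spec_find_first_entry_py lines out) := by unfold Spec_find_first_entry_py; infer_instance

-- ===== CLAIM (what is proved, stated in full; the proofs are below) =====
def Claim_equal_find_first_entry_py : Prop := ∀ (lines : List String), Dom_find_first_entry_py lines → Pre_find_first_entry_py lines → Spec_find_first_entry_py lines (find_first_entry_py lines)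

-- ===== LEMMAS AND PROOFS =====

-- A's first search returns the head of B's position table
theorem pvStart_eq_head (ls : List String) : ∀ (idx : Nat) (seen : Bool),
    pvFindStartA ls idx seen = (pvCollectB ls idx seen).head? := by
  induction ls with
  | nil => intro idx seen; rfl
  | cons l ls ih =>
      intro idx seen
      cases seen with
      | true =>
          by_cases hcm : PySem.Str.startswith l "Commit: " = true <;>
            simp [PySem.Str.startswith] at hcm <;>
            simp [pvFindStartA, pvCollectB, hcm, ih]
      | false => simp [pvFindStartA, pvCollectB, ih]

-- the tail of B's position table is the table rebuilt on the suffix just past its head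
theorem pvCollect_tail (ls : List String) : ∀ (idx : Nat) (seen : Bool) (s : Nat) (rest : List Nat),
    pvCollectB ls idx seen = s :: rest →
      idx ≤ s ∧ rest = pvCollectB (ls.drop (s + 1 - idx)) (s + 1) true := by
  induction ls with
  | nil => intro idx seen s rest hc; simp [pvCollectB] at hc
  | cons l ls ih =>
      intro idx seen s rest hc
      cases seen with
      | true =>
          by_cases hcm : PySem.Str.startswith l "Commit: " = true
          all_goals simp [PySem.Str.startswith] at hcm
          · simp [pvCollectB, hcm] at hc
            obtain ⟨hs, hr⟩ := hc
            subst hs; subst hr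
            refine ⟨le_refl _, ?_⟩
            have : idx + 1 - idx = 1 := by omega
            simp [this]
          · simp [pvCollectB, hcm] at hc
            obtain ⟨h1, h2⟩ := ih (idx + 1) true s rest hc
            refine ⟨by omega, ?_⟩
            have : s + 1 - idx = (s + 1 - (idx + 1)) + 1 := by omega
            simp [this, h2]
      | false =>
          simp only [pvCollectB] at hc
          obtain ⟨h1, h2⟩ := ih (idx + 1) _ s rest hc
          refine ⟨by omega, ?_⟩
          have : s + 1 - idx = (s + 1 - (idx + 1)) + 1 := by omega
          simp [this, h2]

-- A's second search is the head of B's table on the same suffix, defaulting to dflt = len(lines)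
theorem pvEnd_eq (ls : List String) : ∀ (idx dflt : Nat),
    pvFindEndA ls idx dflt = (match pvCollectB ls idx true with | [] => dflt | j :: _ => j) := by
  induction ls with
  | nil => intro idx dflt; rfl
  | cons l ls ih =>
      intro idx dflt
      by_cases hcm : PySem.Str.startswith l "Commit: " = true <;>
        simp [PySem.Str.startswith] at hcm <;>
        simp [pvFindEndA, pvCollectB, hcm, ih]

theorem pvPorts_agree (lines : List String) : find_first_entry_py lines = find_first_entry_py_alt lines := by
  unfold find_first_entry_py find_first_entry_py_alt
  rcases hc : pvCollectB lines 0 false with _ | ⟨s, rest⟩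
  · rw [pvStart_eq_head, hc]; rfl
  · rw [pvStart_eq_head, hc]
    simp only [List.head?]
    obtain ⟨-, htail⟩ := pvCollect_tail lines 0 false s rest hc
    rw [pvEnd_eq]
    simp only [Nat.sub_zero] at htail
    rw [← htail]
    rcases rest with _ | ⟨q, rest'⟩ <;> rfl

-- ===== VERDICT (by name: the statement is the Claim_ definition above) =====
theorem find_first_entry_py_spec : Claim_equal_find_first_entry_py := by
  intro lines _ _
  unfold Spec_find_first_entry_py
  exact pvPorts_agree lines
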